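-- pv_equiv track=rewrite | github.com/wafflejuice/problem-solving-practice | programmers/코딩테스트 연습/탐욕법(Greedy)/체육복.py | solution
-- ===== SOURCE A (Python) =====
-- def solution(n, lost, reserve):
--     lost.sort()
--     reserve.sort()
--
--     i = 0
--     while i < len(lost):
--         if lost[i] in reserve:
--             reserve.remove(lost[i])
--             lost.pop(i)
--             continue
--         i += 1
--
--     i = 0
--     while i < len(lost):
--         if lost[i]-1 in reserve:
--             reserve.remove(lost[i]-1)
--             lost.pop(i)
--             continue
--         if lost[i]+1 in reserve:
--             reserve.remove(lost[i]+1)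
--             lost.pop(i)
--             continue
--
--         i += 1
--
--     return n - len(lost)
-- ===== SOURCE B (Python) =====
-- def solution(n, lost, reserve):
--     # Two-pointer merge over the two sorted lists: one merge cancels exact matches,
--     # a second two-pointer sweep matches each remaining lost student with the
--     # smallest usable neighbour spare. No membership scans or removals at all.
--     # Note: A mutates lost/reserve in place; B does not (return value only).
--     L = sorted(lost)
--     R = sorted(reserve)
--     L2, R2 = [], []
--     i = j = 0
--     while i < len(L) and j < len(R):
--         if L[i] == R[j]:
--             i += 1
--             j += 1
--         elif L[i] < R[j]:
--             L2.append(L[i])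
--             i += 1
--         else:
--             R2.append(R[j])
--             j += 1
--     L2.extend(L[i:])
--     R2.extend(R[j:])
--     missing = 0
--     i = j = 0
--     while i < len(L2):
--         if j < len(R2) and R2[j] < L2[i] - 1:
--             j += 1
--         elif j < len(R2) and R2[j] <= L2[i] + 1:
--             i += 1
--             j += 1
--         else:
--             missing += 1
--             i += 1
--     return n - missing
-- ===== Notes on version B (the rewrite author's own statement) =====
-- stated objective: faster
-- what changed: Replaces A's quadratic in-place scanning (membership test, remove, pop inside while loops) with two two-pointer merge sweeps over the sorted lists: one merge cancels exact matches, a second sweep matches each remaining lost student with the smallest usable neighbour spare; no inner scans, no removals, and B does not mutate its arguments.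
import Mathlib
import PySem

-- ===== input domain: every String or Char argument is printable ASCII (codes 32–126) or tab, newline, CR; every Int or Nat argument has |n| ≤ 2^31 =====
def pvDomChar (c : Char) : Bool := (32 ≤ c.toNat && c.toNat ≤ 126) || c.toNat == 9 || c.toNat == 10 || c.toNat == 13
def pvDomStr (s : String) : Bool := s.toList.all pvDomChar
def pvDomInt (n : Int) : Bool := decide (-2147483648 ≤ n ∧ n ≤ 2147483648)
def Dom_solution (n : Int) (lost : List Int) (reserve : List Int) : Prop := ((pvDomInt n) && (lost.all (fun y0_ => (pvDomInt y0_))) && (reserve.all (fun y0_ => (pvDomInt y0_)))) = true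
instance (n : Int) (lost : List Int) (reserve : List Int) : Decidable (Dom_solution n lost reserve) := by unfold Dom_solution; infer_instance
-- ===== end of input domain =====

-- B replaces A's quadratic in-place list scanning (membership/remove/pop inside while loops)
-- with two two-pointer merge sweeps over the sorted lists (objective: faster). A mutates
-- lost/reserve in place (sort/pop/remove); B does not — the equivalence proved here is
-- about the RETURN value only.

-- termination helper for the two while-loop ports of A (pop(i) shrinks the list)
theorem pvErase_dec {L : List Int} {i : Nat} (h : i < L.length) :
    (L.eraseIdx i).length - i < L.length - i := by
  rw [List.length_eraseIdx_of_lt h]; omega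

-- ===== PORT A =====
-- first while loop: `if lost[i] in reserve: reserve.remove(lost[i]); lost.pop(i); continue`
-- (`x in reserve` succeeding is exactly `PySem.List.remove?` returning some; pop(i) with
--  i < len is exactly List.eraseIdx — PySem.List.pop?_natCast)
def pvLoopA1 (i : Nat) (L R : List Int) : List Int × List Int :=
  if h : i < L.length then
    match PySem.List.remove? R L[i] with
    | some R' => pvLoopA1 i (L.eraseIdx i) R'
    | none => pvLoopA1 (i + 1) L R
  else (L, R)
termination_by L.length - i
decreasing_by
  all_goals first | exact pvErase_dec h | omega

-- second while loop: try lost[i]-1 in reserve, then lost[i]+1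
def pvLoopA2 (i : Nat) (L R : List Int) : List Int × List Int :=
  if h : i < L.length then
    match PySem.List.remove? R (L[i] - 1) with
    | some R' => pvLoopA2 i (L.eraseIdx i) R'
    | none =>
      match PySem.List.remove? R (L[i] + 1) with
      | some R' => pvLoopA2 i (L.eraseIdx i) R'
      | none => pvLoopA2 (i + 1) L R
  else (L, R)
termination_by L.length - i
decreasing_by
  all_goals first | exact pvErase_dec h | omega

def solution (n : Int) (lost : List Int) (reserve : List Int) : Int :=
  let L := PySem.List.sorted lost (fun x => x) false
  let R := PySem.List.sorted reserve (fun x => x) false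
  let p1 := pvLoopA1 0 L R
  let p2 := pvLoopA2 0 p1.1 p1.2
  n - p2.1.length

-- ===== PORT B =====
-- first merge sweep of Source B: walk both sorted lists in step, equal heads cancel,
-- the smaller head goes to its leftover list (the while loop over indices i, j is
-- the obvious structural recursion on the two remaining suffixes; the trailing
-- `extend(L[i:])`/`extend(R[j:])` are the one-sided base cases)
def pvCancel (L R : List Int) : List Int × List Int :=
  match L, R with
  | [], R => ([], R)
  | L, [] => (L, [])
  | x :: L', r :: R' =>
    if x == r then pvCancel L' R'
    else if x < r then
      let p := pvCancel L' (r :: R'); (x :: p.1, p.2)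
    else
      let p := pvCancel (x :: L') R'; (p.1, r :: p.2)
termination_by L.length + R.length

-- second while loop of Source B: spares below x-1 are skipped, a spare in [x-1, x+1]
-- is consumed together with x, otherwise x counts as missing
def pvMatch2 (L R : List Int) : Int :=
  match L, R with
  | [], _ => 0
  | _ :: L', [] => 1 + pvMatch2 L' []
  | x :: L', r :: R' =>
    if r < x - 1 then pvMatch2 (x :: L') R'
    else if r ≤ x + 1 then pvMatch2 L' R'
    else 1 + pvMatch2 L' (r :: R')
termination_by L.length + R.length

def solution_alt (n : Int) (lost : List Int) (reserve : List Int) : Int :=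
  let L := PySem.List.sorted lost (fun x => x) false
  let R := PySem.List.sorted reserve (fun x => x) false
  let p := pvCancel L R
  n - pvMatch2 p.1 p.2

-- ===== PRECONDITION & SPEC =====
def Spec_solution (n : Int) (lost : List Int) (reserve : List Int) (out : Int) : Prop := out = solution_alt n lost reserve
instance (n : Int) (lost : List Int) (reserve : List Int) (out : Int) : Decidable (Spec_solution n lost reserve out) := by unfold Spec_solution; infer_instance

-- ===== CLAIM (what is proved, stated in full; the proofs are below) =====
def Claim_equal_solution : Prop := ∀ (n : Int) (lost : List Int) (reserve : List Int), Dom_solution n lost reserve → Spec_solution n lost reserve (solution n lost reserve)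

-- ===== LEMMAS AND PROOFS =====

-- structural (index-free) versions of A's two while loops
def pvGo1 : List Int → List Int → List Int × List Int
  | [], R => ([], R)
  | x :: xs, R =>
    match PySem.List.remove? R x with
    | some R' => pvGo1 xs R'
    | none => let p := pvGo1 xs R; (x :: p.1, p.2)

def pvGo2 : List Int → List Int → List Int × List Int
  | [], R => ([], R)
  | x :: xs, R =>
    match PySem.List.remove? R (x - 1) with
    | some R' => pvGo2 xs R'
    | none =>
      match PySem.List.remove? R (x + 1) with
      | some R' => pvGo2 xs R'
      | none => let p := pvGo2 xs R; (x :: p.1, p.2)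

theorem pvEraseIdx_take {L : List Int} {i : Nat} (h : i < L.length) :
    (L.eraseIdx i).take i = L.take i := by
  rw [List.eraseIdx_eq_take_drop_succ]
  simp [List.length_take, Nat.le_of_lt h]

theorem pvEraseIdx_drop {L : List Int} {i : Nat} (h : i < L.length) :
    (L.eraseIdx i).drop i = L.drop (i + 1) := by
  rw [List.eraseIdx_eq_take_drop_succ]
  simp [List.length_take, Nat.le_of_lt h]

theorem pvLoopA1_eq_go1 : ∀ (k : Nat) (L R : List Int) (i : Nat), L.length - i = k → i ≤ L.length →
    pvLoopA1 i L R = (L.take i ++ (pvGo1 (L.drop i) R).1, (pvGo1 (L.drop i) R).2) := by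
  intro k
  induction k with
  | zero =>
    intro L R i hk hi
    have hiL : i = L.length := by omega
    rw [pvLoopA1]
    simp [hiL, pvGo1]
  | succ k ih =>
    intro L R i hk hi
    have h : i < L.length := by omega
    rw [pvLoopA1, dif_pos h]
    rw [List.drop_eq_getElem_cons h]
    cases hrem : PySem.List.remove? R L[i] with
    | some R' =>
      simp only [pvGo1, hrem]
      rw [ih (L.eraseIdx i) R' i (by rw [List.length_eraseIdx_of_lt h]; omega)
        (by rw [List.length_eraseIdx_of_lt h]; omega)]
      rw [pvEraseIdx_take h, pvEraseIdx_drop h]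
    | none =>
      simp only [pvGo1, hrem]
      rw [ih L R (i + 1) (by omega) (by omega)]
      have ht : L.take (i + 1) = L.take i ++ [L[i]] := by
        rw [List.take_add_one]
        simp [List.getElem?_eq_getElem h]
      rw [ht]
      simp only [List.append_assoc, List.singleton_append]

theorem pvLoopA2_eq_go2 : ∀ (k : Nat) (L R : List Int) (i : Nat), L.length - i = k → i ≤ L.length →
    pvLoopA2 i L R = (L.take i ++ (pvGo2 (L.drop i) R).1, (pvGo2 (L.drop i) R).2) := by
  intro k
  induction k with
  | zero =>
    intro L R i hk hi
    have hiL : i = L.length := by omega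
    rw [pvLoopA2]
    simp [hiL, pvGo2]
  | succ k ih =>
    intro L R i hk hi
    have h : i < L.length := by omega
    rw [pvLoopA2, dif_pos h]
    rw [List.drop_eq_getElem_cons h]
    cases hrem : PySem.List.remove? R (L[i] - 1) with
    | some R' =>
      simp only [pvGo2, hrem]
      rw [ih (L.eraseIdx i) R' i (by rw [List.length_eraseIdx_of_lt h]; omega)
        (by rw [List.length_eraseIdx_of_lt h]; omega)]
      rw [pvEraseIdx_take h, pvEraseIdx_drop h]
    | none =>
      cases hrem2 : PySem.List.remove? R (L[i] + 1) with
      | some R' =>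
        simp only [pvGo2, hrem, hrem2]
        rw [ih (L.eraseIdx i) R' i (by rw [List.length_eraseIdx_of_lt h]; omega)
          (by rw [List.length_eraseIdx_of_lt h]; omega)]
        rw [pvEraseIdx_take h, pvEraseIdx_drop h]
      | none =>
        simp only [pvGo2, hrem, hrem2]
        rw [ih L R (i + 1) (by omega) (by omega)]
        have ht : L.take (i + 1) = L.take i ++ [L[i]] := by
          rw [List.take_add_one]
          simp [List.getElem?_eq_getElem h]
        rw [ht]
        simp only [List.append_assoc, List.singleton_append]

-- the outputs of the cancel merge are sublists of its inputs
theorem pvCancel_sublist : ∀ (L R : List Int),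
    (pvCancel L R).1.Sublist L ∧ (pvCancel L R).2.Sublist R := by
  
  intro L R
  induction L, R using pvCancel.induct with
  | case1 R => simp [pvCancel]
  | case2 L h => cases L with
    | nil => simp [pvCancel]
    | cons a l => simp [pvCancel]
  | case3 x L' r R' heq ih =>
    simp only [pvCancel, if_pos heq]
    exact ⟨ih.1.cons x, ih.2.cons r⟩
  | case4 x L' r R' heq hlt ih =>
    simp only [pvCancel, if_neg heq, if_pos hlt]
    exact ⟨ih.1.cons₂ x, ih.2⟩
  | case5 x L' r R' heq hlt ih =>
    simp only [pvCancel, if_neg heq, if_neg hlt]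
    exact ⟨ih.1, ih.2.cons₂ r⟩

-- the leftovers of the cancel merge share no element
theorem pvCancel_disjoint : ∀ (L R : List Int), L.Pairwise (· ≤ ·) → R.Pairwise (· ≤ ·) →
    ∀ y ∈ (pvCancel L R).1, y ∉ (pvCancel L R).2 := by
  
  intro L R
  induction L, R using pvCancel.induct with
  | case1 R => intro _ _; simp [pvCancel]
  | case2 L h => intro _ _; cases L with
    | nil => simp [pvCancel]
    | cons a l => simp [pvCancel]
  | case3 x L' r R' heq ih =>
    intro hL hR
    simp only [pvCancel, if_pos heq]
    exact ih hL.of_cons hR.of_cons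
  | case4 x L' r R' heq hlt ih =>
    intro hL hR
    simp only [pvCancel, if_neg heq, if_pos hlt]
    intro y hy
    rcases List.mem_cons.mp hy with hyx | hy
    · subst hyx
      intro hmem
      have := (pvCancel_sublist L' (r :: R')).2.subset hmem
      rcases List.mem_cons.mp this with h | h
      · omega
      · have := List.rel_of_pairwise_cons hR h; omega
    · exact ih hL.of_cons hR y hy
  | case5 x L' r R' heq hlt ih =>
    intro hL hR
    have hrx : r < x := by
      have : ¬ x = r := by simpa using heq
      omega
    simp only [pvCancel, if_neg heq, if_neg hlt]
    intro y hy
    have hyx : x ≤ y := by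
      have := (pvCancel_sublist (x :: L') R').1.subset hy
      rcases List.mem_cons.mp this with h | h
      · omega
      · exact List.rel_of_pairwise_cons hL h
    intro hmem
    rcases List.mem_cons.mp hmem with h | h
    · omega
    · exact ih hL hR.of_cons y hy h

-- a head of R smaller than everything in L is never removed by A's first loop
theorem pvGo1_cons_lt (r : Int) : ∀ (M R' : List Int), (∀ y ∈ M, r < y) →
    pvGo1 M (r :: R') = ((pvGo1 M R').1, r :: (pvGo1 M R').2) := by
  
  intro M
  induction M with
  | nil => intro R' h; simp [pvGo1]
  | cons y M ih =>
    intro R' h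
    have hne : r ≠ y := ne_of_lt (h y List.mem_cons_self)
    have hh : ∀ z ∈ M, r < z := fun z hz => h z (List.mem_cons_of_mem _ hz)
    cases hrem : PySem.List.remove? R' y with
    | some R'' =>
      simp only [pvGo1, PySem.List.remove?_cons_of_ne R' hne, hrem, Option.map_some]
      exact ih R'' hh
    | none =>
      simp only [pvGo1, PySem.List.remove?_cons_of_ne R' hne, hrem, Option.map_none]
      rw [ih R' hh]

theorem pvGo1_nil : ∀ (M : List Int), pvGo1 M [] = (M, []) := by
  intro M
  induction M with
  | nil => simp [pvGo1]
  | cons y M ih =>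
    simp only [pvGo1, (PySem.List.remove?_eq_none_iff _ _).mpr (List.not_mem_nil), ih]

-- on sorted inputs A's first loop computes exactly B's cancel merge
theorem pvGo1_eq_cancel : ∀ (L R : List Int), L.Pairwise (· ≤ ·) → R.Pairwise (· ≤ ·) →
    pvGo1 L R = pvCancel L R := by
  
  intro L R
  induction L, R using pvCancel.induct with
  | case1 R => intro _ _; simp [pvGo1, pvCancel]
  | case2 L h => intro _ _; cases L with
    | nil => simp [pvGo1, pvCancel]
    | cons a l => simp [pvCancel, pvGo1_nil]
  | case3 x L' r R' heq ih =>
    intro hL hR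
    have hxr : x = r := by simpa using heq
    subst hxr
    simp only [pvCancel, if_pos heq, pvGo1, PySem.List.remove?_cons_self]
    exact ih hL.of_cons hR.of_cons
  | case4 x L' r R' heq hlt ih =>
    intro hL hR
    have hnm : x ∉ r :: R' := by
      intro hmem
      rcases List.mem_cons.mp hmem with h | h
      · omega
      · have := List.rel_of_pairwise_cons hR h; omega
    simp only [pvCancel, if_neg heq, if_pos hlt, pvGo1,
      (PySem.List.remove?_eq_none_iff _ _).mpr hnm]
    rw [ih hL.of_cons hR]
  | case5 x L' r R' heq hlt ih =>
    intro hL hR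
    have hrx : r < x := by
      have : ¬ x = r := by simpa using heq
      omega
    have hall : ∀ y ∈ x :: L', r < y := by
      intro y hy
      rcases List.mem_cons.mp hy with h | h
      · omega
      · have := List.rel_of_pairwise_cons hL h; omega
    rw [pvGo1_cons_lt r (x :: L') R' hall, ih hL hR.of_cons]
    simp only [pvCancel, if_neg heq, if_neg hlt]

-- on sorted disjoint leftovers A's second loop leaves exactly pvMatch2 students unmatched;
-- P is the prefix of already-skipped spares (all below every x-1), kept by A, dropped by B
theorem pvGo2_count : ∀ (k : Nat) (L P R : List Int), L.length + R.length ≤ k →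
    L.Pairwise (· ≤ ·) → (P ++ R).Pairwise (· ≤ ·) →
    (∀ y ∈ L, ∀ p ∈ P, p < y - 1) → (∀ y ∈ L, y ∉ P ++ R) →
    ((pvGo2 L (P ++ R)).1.length : Int) = pvMatch2 L R := by
  
  intro k
  induction k with
  | zero =>
    intro L P R hk hL hPR hlow hdisj
    have hLnil : L = [] := by cases L with
      | nil => rfl
      | cons a l => simp only [List.length_cons] at hk; omega
    subst hLnil
    simp [pvGo2, pvMatch2]
  | succ k ih =>
    intro L P R hk hL hPR hlow hdisj
    rcases L with _ | ⟨x, L'⟩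
    · simp [pvGo2, pvMatch2]
    rcases R with _ | ⟨r, R'⟩
    · have hx1 : (x - 1) ∉ P ++ ([] : List Int) := by
        simp only [List.append_nil]
        intro h; have := hlow x List.mem_cons_self _ h; omega
      have hx2 : (x + 1) ∉ P ++ ([] : List Int) := by
        simp only [List.append_nil]
        intro h; have := hlow x List.mem_cons_self _ h; omega
      simp only [pvGo2, (PySem.List.remove?_eq_none_iff _ _).mpr hx1,
        (PySem.List.remove?_eq_none_iff _ _).mpr hx2]
      rw [pvMatch2]
      have := ih L' P [] (by simp only [List.length_cons, List.length_nil] at hk ⊢; omega) hL.of_cons hPR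
        (fun y hy => hlow y (List.mem_cons_of_mem _ hy))
        (fun y hy => hdisj y (List.mem_cons_of_mem _ hy))
      simp only [List.length_cons]
      push_cast
      omega
    · have hxmem : x ∉ P ++ r :: R' := hdisj x List.mem_cons_self
      have hPlt : ∀ p ∈ P, p < x - 1 := hlow x List.mem_cons_self
      have hrR : (r :: R').Pairwise (· ≤ ·) := hPR.sublist (List.sublist_append_right P _)
      have hR'ge : ∀ z ∈ R', r ≤ z := fun z hz => List.rel_of_pairwise_cons hrR hz
      have hxge : ∀ y ∈ L', x ≤ y := fun y hy => List.rel_of_pairwise_cons hL hy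
      by_cases hskip : r < x - 1
      · have hsplit : P ++ r :: R' = (P ++ [r]) ++ R' := by simp
        have := ih (x :: L') (P ++ [r]) R' (by simp only [List.length_cons] at hk ⊢; omega) hL
          (by rw [← hsplit]; exact hPR)
          (by
            intro y hy p hp
            rcases List.mem_append.mp hp with h | h
            · exact hlow y hy p h
            · have hpr : p = r := by simpa using h
              subst hpr
              rcases List.mem_cons.mp hy with h | h
              · omega
              · have := hxge y h; omega)
          (by intro y hy; rw [← hsplit]; exact hdisj y hy)
        rw [hsplit, this, pvMatch2]
        simp only [if_pos hskip]
      · by_cases hmatch : r ≤ x + 1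
        · have hxr : x ≠ r := by
            intro h
            exact hxmem (List.mem_append_right _ (by simp [h]))
          have hselfrem : PySem.List.remove? (P ++ r :: R') r = some (P ++ R') := by
            rw [PySem.List.remove?_eq_some_erase _ _ (List.mem_append_right _ List.mem_cons_self)]
            rw [List.erase_append_right _ (by intro h; have := hPlt r h; omega),
              List.erase_cons_head]
          have htail := ih L' P R' (by simp only [List.length_cons] at hk; omega) hL.of_cons
            (hPR.sublist ((List.sublist_cons_self r R').append_left P))
            (fun y hy => hlow y (List.mem_cons_of_mem _ hy))
            (fun y hy h => hdisj y (List.mem_cons_of_mem _ hy)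
              (((List.sublist_cons_self r R').append_left P).subset h))
          rcases (by omega : r = x - 1 ∨ r = x + 1) with hr | hr
          · subst hr
            simp only [pvGo2, hselfrem]
            rw [pvMatch2]
            simp only [if_neg hskip, if_pos hmatch]
            exact htail
          · subst hr
            have hnone : PySem.List.remove? (P ++ (x + 1) :: R') (x - 1) = none := by
              apply (PySem.List.remove?_eq_none_iff _ _).mpr
              intro h
              rcases List.mem_append.mp h with h | h
              · have := hPlt _ h; omega
              · rcases List.mem_cons.mp h with h | h
                · omega
                · have := hR'ge _ h; omega
            simp only [pvGo2, hnone, hselfrem]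
            rw [pvMatch2]
            simp only [if_neg hskip, if_pos hmatch]
            exact htail
        · have hnone1 : PySem.List.remove? (P ++ r :: R') (x - 1) = none := by
            apply (PySem.List.remove?_eq_none_iff _ _).mpr
            intro h
            rcases List.mem_append.mp h with h | h
            · have := hPlt _ h; omega
            · rcases List.mem_cons.mp h with h | h
              · omega
              · have := hR'ge _ h; omega
          have hnone2 : PySem.List.remove? (P ++ r :: R') (x + 1) = none := by
            apply (PySem.List.remove?_eq_none_iff _ _).mpr
            intro h
            rcases List.mem_append.mp h with h | h
            · have := hPlt _ h; omega
            · rcases List.mem_cons.mp h with h | h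
              · omega
              · have := hR'ge _ h; omega
          simp only [pvGo2, hnone1, hnone2]
          rw [pvMatch2]
          simp only [if_neg hskip, if_neg hmatch]
          have := ih L' P (r :: R') (by simp only [List.length_cons] at hk ⊢; omega) hL.of_cons hPR
            (fun y hy => hlow y (List.mem_cons_of_mem _ hy))
            (fun y hy => hdisj y (List.mem_cons_of_mem _ hy))
          simp only [List.length_cons]
          push_cast
          omega

-- ===== VERDICT (by name: the statement is the Claim_ definition above) =====
theorem solution_spec : Claim_equal_solution := by
  intro n lost reserve _
  unfold Spec_solution solution solution_alt
  set L := PySem.List.sorted lost (fun x => x) false with hL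
  set R := PySem.List.sorted reserve (fun x => x) false with hR
  have hLs : L.Pairwise (· ≤ ·) := PySem.List.sorted_pairwise lost (fun x => x)
  have hRs : R.Pairwise (· ≤ ·) := PySem.List.sorted_pairwise reserve (fun x => x)
  have hA1 := pvLoopA1_eq_go1 (L.length) L R 0 (by omega) (by omega)
  simp only [List.take_zero, List.drop_zero, List.nil_append] at hA1
  have hA2 := pvLoopA2_eq_go2 ((pvGo1 L R).1.length) (pvGo1 L R).1 (pvGo1 L R).2 0
    (by omega) (by omega)
  simp only [List.take_zero, List.drop_zero, List.nil_append] at hA2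
  have hcan := pvGo1_eq_cancel L R hLs hRs
  obtain ⟨hsub1, hsub2⟩ := pvCancel_sublist L R
  have h1s : (pvCancel L R).1.Pairwise (· ≤ ·) := hLs.sublist hsub1
  have h2s : (pvCancel L R).2.Pairwise (· ≤ ·) := hRs.sublist hsub2
  have hdisj := pvCancel_disjoint L R hLs hRs
  have hcount := pvGo2_count ((pvCancel L R).1.length + (pvCancel L R).2.length)
    (pvCancel L R).1 [] (pvCancel L R).2 (Nat.le_refl _) h1s (by simpa using h2s)
    (by intro y _ p hp; simp at hp)
    (by intro y hy; simpa using hdisj y hy)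
  simp only [List.nil_append] at hcount
  show n - ((pvLoopA2 0 (pvLoopA1 0 L R).1 (pvLoopA1 0 L R).2).1.length : Int) =
    n - pvMatch2 (pvCancel L R).1 (pvCancel L R).2
  rw [hA1, hA2, hcan, hcount]
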